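-- pv_equiv track=rewrite | github.com/Milstein-Corp/exercises | schedules-interview-question-FL/main.py | produceSchedule
-- ===== SOURCE A (Python) =====
-- def produceSchedule(bm, duration):
--     avails = []
--     count = 0
--     meeting = False
--     meeting_start = -1
--     for m in range(len(bm)):
--         if bm[m] and not meeting:  # start of meeting
--             count = 1
--             meeting = True
--             meeting_start = m
--         elif bm[m] and meeting:  # middle of ongoing meeting
--             count += 1
--             meeting = True
--         elif not bm[m] and meeting:  # end of meeting
--             valid_meeting = (meeting_start, m - 1)
--             meeting = False
--             if count >= duration:
--                 avails.append(valid_meeting)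
--         elif not bm[m] and not meeting:  # no possible meeting
--             pass
--
--     if bm[-1]:  # edge case where meeting goes to the last minute of the day
--         valid_meeting = (meeting_start, len(bm) - 1)
--         if count >= duration:
--             avails.append(valid_meeting)
--
--     return avails
-- ===== SOURCE B (Python) =====
-- def produceSchedule(bm, duration):
--     # Run-length scan with two indices: find each maximal run of True in one
--     # inner advance, no meeting/meeting_start/count state machine, no tail block.
--     avails = []
--     i, n = 0, len(bm)
--     while i < n:
--         if bm[i]:
--             j = i
--             while j < n and bm[j]:
--                 j += 1
--             if j - i >= duration:
--                 avails.append((i, j - 1))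
--             i = j
--         else:
--             i += 1
--     return avails
-- ===== Notes on version B (the rewrite author's own statement) =====
-- stated objective: simpler
-- what changed: Replaced A's per-minute state machine (meeting/meeting_start/count flags plus a separate bm[-1] tail block) by a two-index run-length scan that finds each maximal run of True in one inner advance and emits it immediately.
import Mathlib
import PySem

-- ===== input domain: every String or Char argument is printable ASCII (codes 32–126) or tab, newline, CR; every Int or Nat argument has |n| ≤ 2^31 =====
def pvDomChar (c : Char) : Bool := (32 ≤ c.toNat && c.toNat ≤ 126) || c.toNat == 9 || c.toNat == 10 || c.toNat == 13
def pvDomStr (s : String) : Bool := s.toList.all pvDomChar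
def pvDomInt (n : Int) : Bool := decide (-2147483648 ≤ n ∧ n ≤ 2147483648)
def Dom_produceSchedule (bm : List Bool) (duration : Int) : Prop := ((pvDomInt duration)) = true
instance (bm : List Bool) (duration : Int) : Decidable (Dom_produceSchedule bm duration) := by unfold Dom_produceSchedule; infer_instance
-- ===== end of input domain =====

-- B replaces A's per-minute flag state machine (+ separate bm[-1] tail block) by a
-- two-index run-length scan; same cost, simpler shape. On empty bm A raises, B returns [].

-- ===== PORT A =====
-- the for-loop over range(len(bm)) with state (avails, count, meeting, meeting_start),
-- transliterated as index recursion; bm[m] is in range for every visited m, so bm[m] is exact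
def aGo (bm : List Bool) (duration : Int) (avails : List (Int × Int)) (count : Int)
    (meeting : Bool) (mstart : Int) (m : Nat) : List (Int × Int) × Int × Bool × Int :=
  if h : m < bm.length then
    if bm[m] && !meeting then
      aGo bm duration avails 1 true (m : Int) (m + 1)
    else if bm[m] && meeting then
      aGo bm duration avails (count + 1) true mstart (m + 1)
    else if !bm[m] && meeting then
      aGo bm duration (if count ≥ duration then avails ++ [(mstart, (m : Int) - 1)] else avails)
        count false mstart (m + 1)
    else
      aGo bm duration avails count meeting mstart (m + 1)
  else (avails, count, meeting, mstart)
termination_by bm.length - m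

-- the trailing `if bm[-1]: …` block; bm[-1] via PySem.List.pyGet? (none = IndexError, outside Pre_)
def aFinish (bm : List Bool) (duration : Int) (st : List (Int × Int) × Int × Bool × Int) :
    List (Int × Int) :=
  if (PySem.List.pyGet? bm (-1)).getD false then
    if st.2.1 ≥ duration then st.1 ++ [(st.2.2.2, (bm.length : Int) - 1)] else st.1
  else st.1

def produceSchedule (bm : List Bool) (duration : Int) : List (Int × Int) :=
  aFinish bm duration (aGo bm duration [] 0 false (-1) 0)

-- ===== PORT B =====
-- the inner `while j < n and bm[j]: j += 1` loop
def runEnd (bm : List Bool) (j : Nat) : Nat :=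
  if h : j < bm.length then
    if bm[j] then runEnd bm (j + 1) else j
  else j
termination_by bm.length - j

lemma runEnd_ge (bm : List Bool) (k : Nat) : k ≤ runEnd bm k := by
  induction k using runEnd.induct bm with
  | case1 k hk hb ih => rw [runEnd]; simp only [hk, hb, dif_pos, if_pos]; omega
  | case2 k hk hb => rw [runEnd]; simp [hk, hb]
  | case3 k hk => rw [runEnd]; simp [hk]

-- the outer while-loop of Source B
def bLoop (bm : List Bool) (duration : Int) (i : Nat) (avails : List (Int × Int)) :
    List (Int × Int) :=
  if h : i < bm.length then
    if hb : bm[i] then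
      let j := runEnd bm i
      bLoop bm duration j
        (if (j : Int) - (i : Int) ≥ duration then avails ++ [((i : Int), (j : Int) - 1)] else avails)
    else bLoop bm duration (i + 1) avails
  else avails
termination_by bm.length - i
decreasing_by
  · have h1 : runEnd bm i = runEnd bm (i + 1) := by
      rw [runEnd]; simp [h, hb]
    have h2 := runEnd_ge bm (i + 1)
    omega
  · omega

def produceSchedule_alt (bm : List Bool) (duration : Int) : List (Int × Int) :=
  bLoop bm duration 0 []

-- ===== PRECONDITION & SPEC =====
-- Pre_ excludes only the empty list, on which Python A raises IndexError at bm[-1]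
def Pre_produceSchedule (bm : List Bool) (duration : Int) : Prop := bm ≠ []
instance (bm : List Bool) (duration : Int) : Decidable (Pre_produceSchedule bm duration) := by
  unfold Pre_produceSchedule; infer_instance
def pvWitness_produceSchedule : List Bool × Int := ([true, true, false, true], 2)

def Spec_produceSchedule (bm : List Bool) (duration : Int) (out : List (Int × Int)) : Prop :=
  out = produceSchedule_alt bm duration
instance (bm : List Bool) (duration : Int) (out : List (Int × Int)) :
    Decidable (Spec_produceSchedule bm duration out) := by
  unfold Spec_produceSchedule; infer_instance

-- ===== CLAIM (what is proved, stated in full; the proofs are below) =====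
def Claim_equal_produceSchedule : Prop := ∀ (bm : List Bool) (duration : Int),
  Dom_produceSchedule bm duration → Pre_produceSchedule bm duration →
  Spec_produceSchedule bm duration (produceSchedule bm duration)


-- ===== LEMMAS AND PROOFS =====

lemma runEnd_succ (bm : List Bool) (i : Nat) (h : i < bm.length) (hb : bm[i] = true) :
    runEnd bm i = runEnd bm (i + 1) := by
  rw [runEnd]; simp [h, hb]

lemma runEnd_stop (bm : List Bool) (i : Nat) (h : i < bm.length) (hb : bm[i] = false) :
    runEnd bm i = i := by
  rw [runEnd]; simp [h, hb]

lemma runEnd_end (bm : List Bool) : runEnd bm bm.length = bm.length := by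
  rw [runEnd]; simp

lemma pyGet_last (bm : List Bool) (hne : bm ≠ []) (h : bm.length - 1 < bm.length) :
    (PySem.List.pyGet? bm (-1)).getD false = bm[bm.length - 1] := by
  rw [PySem.List.pyGet?_neg_one]
  rw [List.getLast?_eq_getElem?]
  simp [List.getElem?_eq_getElem h]

-- the main invariant, by induction on the remaining length k ≥ bm.length - i:
-- (out) with meeting = false and (in) inside a run started at s, A's finished result
-- equals B's loop from the current position
lemma main_inv (bm : List Bool) (duration : Int) (hne : bm ≠ []) : ∀ (k : Nat),
    (∀ (i : Nat) (avails : List (Int × Int)) (count mstart : Int),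
      bm.length - i ≤ k → i ≤ bm.length →
      (i = bm.length → bm[bm.length - 1]'(by have := List.length_pos_of_ne_nil hne; omega) = false) →
      aFinish bm duration (aGo bm duration avails count false mstart i) =
        bLoop bm duration i avails) ∧
    (∀ (i s : Nat) (avails : List (Int × Int)),
      bm.length - i ≤ k → s < i → i ≤ bm.length →
      (∀ l : Nat, s ≤ l → l < i → ∀ hl : l < bm.length, bm[l] = true) →
      aFinish bm duration (aGo bm duration avails ((i : Int) - (s : Int)) true (s : Int) i) =
        bLoop bm duration (runEnd bm i)
          (if (runEnd bm i : Int) - (s : Int) ≥ duration then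
            avails ++ [((s : Int), (runEnd bm i : Int) - 1)] else avails)) := by
  intro k
  induction k with
  | zero =>
    constructor
    · intro i avails count mstart hk hi hlast
      have hieq : i = bm.length := by omega
      subst hieq
      rw [aGo]; simp only [lt_irrefl, dite_false]
      rw [bLoop]; simp only [lt_irrefl, dite_false]
      unfold aFinish
      rw [pyGet_last bm hne (by have := List.length_pos_of_ne_nil hne; omega), hlast rfl]
      simp
    · intro i s avails hk hs hi hrun
      have hieq : i = bm.length := by omega
      subst hieq
      rw [aGo]; simp only [lt_irrefl, dite_false]
      rw [runEnd_end, bLoop]; simp only [lt_irrefl, dite_false]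
      unfold aFinish
      have hlt : bm.length - 1 < bm.length := by have := List.length_pos_of_ne_nil hne; omega
      rw [pyGet_last bm hne hlt]
      rw [hrun (bm.length - 1) (by omega) (by omega) hlt]
      simp
  | succ k ih =>
    obtain ⟨ihOut, ihIn⟩ := ih
    constructor
    · intro i avails count mstart hk hi hlast
      by_cases hlt : i < bm.length
      · by_cases hb : bm[i] = true
        · rw [aGo, dif_pos hlt, if_pos (by simp [hb])]
          rw [bLoop, dif_pos hlt, dif_pos hb]
          have hre : runEnd bm i = runEnd bm (i + 1) := runEnd_succ bm i hlt hb
          have := ihIn (i + 1) i avails (by omega) (by omega) (by omega)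
            (by intro l hl1 hl2 hl3; have : l = i := by omega
                subst this; exact hb)
          simp only [Nat.cast_add, Nat.cast_one] at this
          have harith : ((i : Int) + 1) - (i : Int) = 1 := by ring
          rw [harith] at this
          rw [this, ← hre]
        · have hbf : bm[i] = false := by simpa using hb
          rw [aGo, dif_pos hlt, if_neg (by simp [hbf]), if_neg (by simp [hbf]),
            if_neg (by simp)]
          rw [bLoop, dif_pos hlt, dif_neg (by simp [hbf])]
          exact ihOut (i + 1) avails count mstart (by omega) (by omega)
            (by intro h; have h2 : bm.length - 1 = i := by omega
                simp only [h2]; exact hbf)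
      · have hieq : i = bm.length := by omega
        subst hieq
        rw [aGo]; simp only [lt_irrefl, dite_false]
        rw [bLoop]; simp only [lt_irrefl, dite_false]
        unfold aFinish
        rw [pyGet_last bm hne (by have := List.length_pos_of_ne_nil hne; omega), hlast rfl]
        simp
    · intro i s avails hk hs hi hrun
      by_cases hlt : i < bm.length
      · by_cases hb : bm[i] = true
        · -- run continues
          rw [aGo, dif_pos hlt, if_neg (by simp), if_pos (by simp [hb])]
          have hre : runEnd bm i = runEnd bm (i + 1) := runEnd_succ bm i hlt hb
          have := ihIn (i + 1) s avails (by omega) (by omega) (by omega)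
            (by intro l hl1 hl2 hl3
                by_cases hli : l < i
                · exact hrun l hl1 hli hl3
                · have : l = i := by omega
                  subst this; exact hb)
          simp only [Nat.cast_add, Nat.cast_one] at this
          have harith : ((i : Int) - (s : Int)) + 1 = ((i : Int) + 1) - (s : Int) := by ring
          rw [harith, this, ← hre]
        · -- run ends at i
          have hbf : bm[i] = false := by simpa using hb
          rw [aGo, dif_pos hlt, if_neg (by simp), if_neg (by simp [hbf]),
            if_pos (by simp [hbf])]
          have hre : runEnd bm i = i := runEnd_stop bm i hlt hbf
          rw [hre, bLoop, dif_pos hlt, dif_neg (by simp [hbf])]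
          exact ihOut (i + 1) _ _ _ (by omega) (by omega)
            (by intro h; have h2 : bm.length - 1 = i := by omega
                simp only [h2]; exact hbf)
      · have hieq : i = bm.length := by omega
        subst hieq
        rw [aGo]; simp only [lt_irrefl, dite_false]
        rw [runEnd_end, bLoop]; simp only [lt_irrefl, dite_false]
        unfold aFinish
        have hlt1 : bm.length - 1 < bm.length := by have := List.length_pos_of_ne_nil hne; omega
        rw [pyGet_last bm hne hlt1]
        rw [hrun (bm.length - 1) (by omega) (by omega) hlt1]
        simp

-- ===== VERDICT (by name: the statement is the Claim_ definition above) =====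
theorem produceSchedule_spec : Claim_equal_produceSchedule := by
  intro bm duration _hdom hpre
  unfold Spec_produceSchedule produceSchedule produceSchedule_alt
  have hne : bm ≠ [] := hpre
  have := (main_inv bm duration hne bm.length).1 0 [] 0 (-1) (by omega) (by omega)
    (by intro h; exact absurd (List.eq_nil_of_length_eq_zero h.symm) hne)
  exact this
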